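-- pv_equiv track=rewrite | github.com/fRomke/rummi | rummi.py | determinePossibleRuns
-- ===== SOURCE A (Python) =====
-- minimal_size = "minimal_size"
--
-- def determinePossibleRuns(cfg, remaining_hand, run_size): #456
--     options = []
--     if (remaining_hand-run_size) >= cfg[minimal_size]:
--         options.append(run_size)
--         options += determinePossibleRuns(cfg, remaining_hand, run_size+1)
--     else:
--         options.append(remaining_hand)
--     return options
-- ===== SOURCE B (Python) =====
-- minimal_size = "minimal_size"
--
-- def determinePossibleRuns(cfg, remaining_hand, run_size):
--     hi = remaining_hand - cfg[minimal_size]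
--     return list(range(run_size, hi + 1)) + [remaining_hand]
-- ===== Notes on version B (the rewrite author's own statement) =====
-- stated objective: simpler
-- what changed: Replaces the recursion that appends one run size per call with a closed-form list(range(run_size, remaining_hand-cfg[minimal_size]+1)) plus the trailing remaining_hand; Pre_ excludes only inputs lacking the "minimal_size" key, on which both programs raise KeyError.
import Mathlib
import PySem

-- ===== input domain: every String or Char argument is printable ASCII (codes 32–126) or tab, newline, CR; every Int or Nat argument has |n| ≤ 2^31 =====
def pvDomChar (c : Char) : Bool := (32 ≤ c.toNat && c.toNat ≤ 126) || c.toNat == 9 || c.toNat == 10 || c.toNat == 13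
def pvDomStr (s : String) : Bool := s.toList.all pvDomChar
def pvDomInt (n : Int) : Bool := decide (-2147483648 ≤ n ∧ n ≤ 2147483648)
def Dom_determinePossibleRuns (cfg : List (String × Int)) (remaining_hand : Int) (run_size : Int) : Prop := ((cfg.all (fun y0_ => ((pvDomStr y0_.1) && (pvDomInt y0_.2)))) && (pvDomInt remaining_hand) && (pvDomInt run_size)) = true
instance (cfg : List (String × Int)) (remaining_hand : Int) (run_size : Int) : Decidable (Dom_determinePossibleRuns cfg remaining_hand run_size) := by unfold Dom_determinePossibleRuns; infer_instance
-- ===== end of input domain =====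

-- B replaces A's recursion with a closed-form range plus trailing element (simpler; Pre_ excludes only inputs missing the "minimal_size" key, on which both programs raise KeyError).


-- ===== PORT A =====
-- literal port of A's recursion; 'none' branch = KeyError (excluded by Pre_)
def determinePossibleRuns (cfg : List (String × Int)) (remaining_hand : Int) (run_size : Int) : List Int :=
  match h : (PySem.Dict.mk cfg).get? "minimal_size" with
  | none => []
  | some m =>
      if remaining_hand - run_size ≥ m then
        run_size :: determinePossibleRuns cfg remaining_hand (run_size + 1)
      else
        [remaining_hand]
termination_by (remaining_hand - ((PySem.Dict.mk cfg).get? "minimal_size").getD 0 - run_size + 1).toNat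
decreasing_by simp [h]; omega

-- ===== PORT B =====
def determinePossibleRuns_alt (cfg : List (String × Int)) (remaining_hand : Int) (run_size : Int) : List Int :=
  match (PySem.Dict.mk cfg).get? "minimal_size" with
  | none => []
  | some m => PySem.List.pyRange run_size (remaining_hand - m + 1) 1 ++ [remaining_hand]

-- ===== PRECONDITION & SPEC =====
-- Pre_ requires cfg to carry the key "minimal_size": without it both A and B raise KeyError.
def Pre_determinePossibleRuns (cfg : List (String × Int)) (remaining_hand : Int) (run_size : Int) : Prop :=
  ((PySem.Dict.mk cfg).get? "minimal_size").isSome = true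
instance (cfg : List (String × Int)) (remaining_hand : Int) (run_size : Int) : Decidable (Pre_determinePossibleRuns cfg remaining_hand run_size) := by unfold Pre_determinePossibleRuns; infer_instance

def pvWitness_determinePossibleRuns : (List (String × Int)) × Int × Int := ([("minimal_size", 2)], 10, 5)

def Spec_determinePossibleRuns (cfg : List (String × Int)) (remaining_hand : Int) (run_size : Int) (out : List Int) : Prop := out = determinePossibleRuns_alt cfg remaining_hand run_size
instance (cfg : List (String × Int)) (remaining_hand : Int) (run_size : Int) (out : List Int) : Decidable (Spec_determinePossibleRuns cfg remaining_hand run_size out) := by unfold Spec_determinePossibleRuns; infer_instance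

-- ===== CLAIM (what is proved, stated in full; the proofs are below) =====
def Claim_equal_determinePossibleRuns : Prop := ∀ (cfg : List (String × Int)) (remaining_hand : Int) (run_size : Int), Dom_determinePossibleRuns cfg remaining_hand run_size → Pre_determinePossibleRuns cfg remaining_hand run_size → Spec_determinePossibleRuns cfg remaining_hand run_size (determinePossibleRuns cfg remaining_hand run_size)

-- ===== LEMMAS AND PROOFS =====
lemma pvA_closed (cfg : List (String × Int)) (rh m : Int)
    (hm : (PySem.Dict.mk cfg).get? "minimal_size" = some m) :
    ∀ (n : Nat) (rs : Int), (rh - m - rs + 1).toNat = n →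
      determinePossibleRuns cfg rh rs = PySem.List.pyRange rs (rh - m + 1) 1 ++ [rh] := by
  intro n
  induction n with
  | zero =>
      intro rs hn
      rw [determinePossibleRuns]
      split
      · next heq => rw [hm] at heq; cases heq
      · next m' heq =>
          rw [hm] at heq; injection heq with e; subst e
          rw [if_neg (by omega), PySem.List.pyRange_one_eq_nil (by omega)]
          simp
  | succ k ih =>
      intro rs hn
      rw [determinePossibleRuns]
      split
      case _ heq => rw [hm] at heq; cases heq
      case _ m' heq =>
      rw [hm] at heq; injection heq with e; subst e
      by_cases h : rh - rs ≥ m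
      · rw [if_pos h, ih (rs + 1) (by omega),
          PySem.List.pyRange_one_cons (by omega : rs < rh - m + 1)]
        simp
      · rw [if_neg h, PySem.List.pyRange_one_eq_nil (by omega)]
        simp

-- ===== VERDICT (by name: the statement is the Claim_ definition above) =====
theorem determinePossibleRuns_spec : Claim_equal_determinePossibleRuns := by
  intro cfg rh rs _ hpre
  unfold Pre_determinePossibleRuns at hpre
  unfold Spec_determinePossibleRuns determinePossibleRuns_alt
  cases hm : (PySem.Dict.mk cfg).get? "minimal_size" with
  | none => simp [hm] at hpre
  | some m => exact pvA_closed cfg rh m hm _ rs rfl
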